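-- pv_equiv track=rewrite | github.com/Antonc15/TypeStrong-GroupProject | octInt.py | state14
-- ===== SOURCE A (Python) =====
-- octalDigits = ["0", "1", "2", "3", "4", "5", "6", "7"]
--
-- def state14(word, index):
--     # Checks if the given input has no more characters left.
--     if index >= len(word):
--         # Since state 14 is an accepting state, return True.
--         return True
--
--     # Gets the character of input at the specified index.
--     char = word[index]
--
--     # Checks if the given character is in octalDigits.
--     if char in octalDigits:
--         return state14(word, index + 1)
--
--     # Checks if the given character is a underscore..
--     elif char == "_":
--         return state15(word, index + 1)
--
--     return False
--
-- def state15(word, index):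
--     # Checks if the given input has no more characters left.
--     if index >= len(word):
--         # Since state 15 isn't an accepting state, return False.
--         return False
--
--     # Gets the character of input at the specified index.
--     char = word[index]
--
--     #Checks if given character is in octalDigits.
--     if char in octalDigits:
--         return state14(word, index + 1)
--
--     return False
-- ===== SOURCE B (Python) =====
-- octalDigits = ["0", "1", "2", "3", "4", "5", "6", "7"]
--
-- def state14(word, index):
--     # Single iterative DFA loop: in_state14 True = state 14 (accepting),
--     # False = state 15 (just after an underscore, non-accepting).
--     in_state14 = True
--     i = index
--     n = len(word)
--     while i < n:
--         char = word[i]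
--         if char in octalDigits:
--             in_state14 = True
--         elif char == "_" and in_state14:
--             in_state14 = False
--         else:
--             return False
--         i += 1
--     return in_state14
-- ===== Notes on version B (the rewrite author's own statement) =====
-- stated objective: simpler
-- what changed: Replaced the two mutually recursive state functions with a single iterative loop carrying an explicit boolean DFA state flag.
import Mathlib
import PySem

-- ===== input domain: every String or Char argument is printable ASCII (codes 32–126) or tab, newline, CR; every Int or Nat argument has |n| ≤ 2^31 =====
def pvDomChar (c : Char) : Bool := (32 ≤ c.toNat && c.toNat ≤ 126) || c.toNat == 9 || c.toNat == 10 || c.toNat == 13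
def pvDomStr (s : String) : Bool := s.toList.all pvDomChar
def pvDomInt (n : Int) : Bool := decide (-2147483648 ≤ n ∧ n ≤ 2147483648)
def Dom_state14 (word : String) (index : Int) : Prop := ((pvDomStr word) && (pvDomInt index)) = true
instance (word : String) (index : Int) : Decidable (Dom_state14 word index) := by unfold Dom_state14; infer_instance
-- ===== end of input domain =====

-- B replaces A's two mutually recursive FSM states with one loop over an explicit boolean state flag (objective: simpler).

-- ===== PORT A =====
def octalDigits : List Char := ['0', '1', '2', '3', '4', '5', '6', '7']

mutual
def state14 (word : String) (index : Int) : Bool :=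
  if index ≥ PySem.Str.len word then true
  else
    match PySem.Str.pyGet? word index with
    | none => false   -- IndexError in Python; excluded by Pre_state14
    | some char =>
      if char ∈ octalDigits then state14 word (index + 1)
      else if char = '_' then state15 word (index + 1)
      else false
  termination_by (PySem.Str.len word - index).toNat
  decreasing_by all_goals omega
def state15 (word : String) (index : Int) : Bool :=
  if index ≥ PySem.Str.len word then false
  else
    match PySem.Str.pyGet? word index with
    | none => false   -- IndexError in Python; excluded by Pre_state14
    | some char =>
      if char ∈ octalDigits then state14 word (index + 1)
      else false
  termination_by (PySem.Str.len word - index).toNat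
  decreasing_by all_goals omega
end

-- ===== PORT B =====
def altLoop (word : String) (i : Int) (inState14 : Bool) : Bool :=
  if i < PySem.Str.len word then
    match PySem.Str.pyGet? word i with
    | none => false   -- IndexError in Python; excluded by Pre_state14
    | some char =>
      if char ∈ octalDigits then altLoop word (i + 1) true
      else if char = '_' && inState14 then altLoop word (i + 1) false
      else false
  else inState14
termination_by (PySem.Str.len word - i).toNat
decreasing_by all_goals omega

def state14_alt (word : String) (index : Int) : Bool := altLoop word index true

-- ===== PRECONDITION & SPEC =====
-- Pre_ excludes exactly the inputs where both Pythons raise IndexError: index below -len(word).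
def Pre_state14 (word : String) (index : Int) : Prop := -(PySem.Str.len word) ≤ index
instance (word : String) (index : Int) : Decidable (Pre_state14 word index) := by unfold Pre_state14; infer_instance
def pvWitness_state14 : String × Int := ("1_7", 0)

def Spec_state14 (word : String) (index : Int) (out : Bool) : Prop := out = state14_alt word index
instance (word : String) (index : Int) (out : Bool) : Decidable (Spec_state14 word index out) := by unfold Spec_state14; infer_instance

-- ===== CLAIM (what is proved, stated in full; the proofs are below) =====
def Claim_equal_state14 : Prop := ∀ (word : String) (index : Int), Dom_state14 word index → Pre_state14 word index → Spec_state14 word index (state14 word index)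

-- ===== LEMMAS AND PROOFS =====
lemma state_eq_altLoop (word : String) : ∀ (fuel : Nat) (index : Int),
    (PySem.Str.len word - index).toNat = fuel →
    state14 word index = altLoop word index true ∧ state15 word index = altLoop word index false := by
  intro fuel
  induction fuel with
  | zero =>
    intro index h
    have hge : index ≥ ((word.toList.length : Int)) := by
      simp only [PySem.Str.len_eq] at h; omega
    have hnlt : ¬ index < ((word.toList.length : Int)) := by omega
    constructor
    · rw [state14.eq_def, altLoop.eq_def]
      simp only [PySem.Str.len_eq, if_pos hge, if_neg hnlt]
    · rw [state15.eq_def, altLoop.eq_def]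
      simp only [PySem.Str.len_eq, if_pos hge, if_neg hnlt]
  | succ n ih =>
    intro index h
    by_cases hge : index ≥ ((word.toList.length : Int))
    · have hnlt : ¬ index < ((word.toList.length : Int)) := by omega
      constructor
      · rw [state14.eq_def, altLoop.eq_def]
        simp only [PySem.Str.len_eq, if_pos hge, if_neg hnlt]
      · rw [state15.eq_def, altLoop.eq_def]
        simp only [PySem.Str.len_eq, if_pos hge, if_neg hnlt]
    · have hlt : index < ((word.toList.length : Int)) := by omega
      have hnext : (PySem.Str.len word - (index + 1)).toNat = n := by
        simp only [PySem.Str.len_eq] at h ⊢; omega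
      obtain ⟨ih14, ih15⟩ := ih (index + 1) hnext
      constructor
      · rw [state14.eq_def, altLoop.eq_def]
        simp only [PySem.Str.len_eq, if_neg hge, if_pos hlt]
        cases hc : PySem.Str.pyGet? word index with
        | none => rfl
        | some char =>
          by_cases hoct : char ∈ octalDigits
          · simp only [if_pos hoct, ih14]
          · by_cases hus : char = '_'
            · simp [hus, ih15, octalDigits]
            · simp [hus, ih14, octalDigits]
      · rw [state15.eq_def, altLoop.eq_def]
        simp only [PySem.Str.len_eq, if_neg hge, if_pos hlt]
        cases hc : PySem.Str.pyGet? word index with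
        | none => rfl
        | some char =>
          by_cases hoct : char ∈ octalDigits
          · simp only [if_pos hoct, ih14]
          · by_cases hus : char = '_'
            · simp [hus, octalDigits]
            · simp [hus, ih14, octalDigits]

-- ===== VERDICT (by name: the statement is the Claim_ definition above) =====
theorem state14_spec : Claim_equal_state14 := by
  intro word index _ _
  unfold Spec_state14 state14_alt
  exact (state_eq_altLoop word _ index rfl).1
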